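-- pv_equiv track=rewrite | github.com/eujhwang/personalized-llms | error_analaysis.py | check_same_demographic
-- ===== SOURCE A (Python) =====
-- def check_same_demographic(user1_demo, user2_demo):
--     for key in user1_demo.keys():
--         user1_value = user1_demo[key]
--         if key not in user2_demo:
--             continue
--
--         user2_value = user2_demo[key]
--         if user1_value != user2_value:
--             return False
--     return True
-- ===== SOURCE B (Python) =====
-- def check_same_demographic(user1_demo, user2_demo):
--     items1 = sorted(user1_demo.items(), key=lambda kv: kv[0])
--     items2 = sorted(user2_demo.items(), key=lambda kv: kv[0])
--     i = j = 0
--     while i < len(items1) and j < len(items2):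
--         (k1, v1), (k2, v2) = items1[i], items2[j]
--         if k1 < k2:
--             i += 1
--         elif k2 < k1:
--             j += 1
--         elif v1 != v2:
--             return False
--         else:
--             i += 1
--             j += 1
--     return True
-- ===== Notes on version B (the rewrite author's own statement) =====
-- stated objective: alternative
-- what changed: Replaces A's per-key hash-lookup scan with early return by sorting both item lists by key and running a two-pointer merge that compares values whenever the fronts carry the same key.
import Mathlib
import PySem

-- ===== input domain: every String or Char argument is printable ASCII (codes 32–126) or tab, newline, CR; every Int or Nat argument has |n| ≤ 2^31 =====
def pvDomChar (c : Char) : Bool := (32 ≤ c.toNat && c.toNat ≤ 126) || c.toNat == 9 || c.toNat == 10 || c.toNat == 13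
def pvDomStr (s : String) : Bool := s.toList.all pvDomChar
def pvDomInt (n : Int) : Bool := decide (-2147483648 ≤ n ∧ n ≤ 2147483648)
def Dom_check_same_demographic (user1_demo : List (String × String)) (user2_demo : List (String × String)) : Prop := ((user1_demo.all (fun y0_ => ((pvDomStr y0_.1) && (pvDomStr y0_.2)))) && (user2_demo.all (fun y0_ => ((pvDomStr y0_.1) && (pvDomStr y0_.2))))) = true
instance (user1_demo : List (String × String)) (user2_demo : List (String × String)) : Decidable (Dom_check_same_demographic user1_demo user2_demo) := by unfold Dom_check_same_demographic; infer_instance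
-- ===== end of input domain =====

-- B replaces A's hash-lookup scan by sort-both-then-two-pointer-merge; objective: alternative algorithm, same result.

-- ===== PORT A =====
-- A: scan user1's keys; for each shared key compare values, early-return False on mismatch.
def csdLoop (d1 d2 : PySem.Dict String String) : List String → Bool
  | [] => true
  | k :: rest =>
    let user1_value := d1.getD k ""       -- user1_demo[key]: key comes from d1.keys, so present
    if ¬ d2.contains k then csdLoop d1 d2 rest
    else
      let user2_value := d2.getD k ""
      if user1_value ≠ user2_value then false
      else csdLoop d1 d2 rest

def check_same_demographic (user1_demo : List (String × String)) (user2_demo : List (String × String)) : Bool :=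
  let d1 := PySem.Dict.ofList user1_demo
  let d2 := PySem.Dict.ofList user2_demo
  csdLoop d1 d2 d1.keys

-- ===== PORT B =====
-- B: sort both item lists by key, then a two-pointer merge: advance the side with the
-- smaller key; on a common key compare the two values (early False on mismatch).
def csdMerge : List (String × String) → List (String × String) → Bool
  | [], _ => true
  | _ :: _, [] => true
  | (k1, v1) :: t1, (k2, v2) :: t2 =>
    if k1 < k2 then csdMerge t1 ((k2, v2) :: t2)
    else if k2 < k1 then csdMerge ((k1, v1) :: t1) t2
    else if v1 ≠ v2 then false
    else csdMerge t1 t2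

def check_same_demographic_alt (user1_demo : List (String × String)) (user2_demo : List (String × String)) : Bool :=
  let items1 := PySem.List.sorted (PySem.Dict.ofList user1_demo).items (fun kv => kv.1)
  let items2 := PySem.List.sorted (PySem.Dict.ofList user2_demo).items (fun kv => kv.1)
  csdMerge items1 items2

-- ===== PRECONDITION & SPEC =====
def Spec_check_same_demographic (user1_demo : List (String × String)) (user2_demo : List (String × String)) (out : Bool) : Prop := out = check_same_demographic_alt user1_demo user2_demo
instance (user1_demo : List (String × String)) (user2_demo : List (String × String)) (out : Bool) : Decidable (Spec_check_same_demographic user1_demo user2_demo out) := by unfold Spec_check_same_demographic; infer_instance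

-- ===== CLAIM (what is proved, stated in full; the proofs are below) =====
def Claim_equal_check_same_demographic : Prop := ∀ (user1_demo : List (String × String)) (user2_demo : List (String × String)), Dom_check_same_demographic user1_demo user2_demo → Spec_check_same_demographic user1_demo user2_demo (check_same_demographic user1_demo user2_demo)

-- ===== LEMMAS AND PROOFS =====

-- A's loop decides "every key of ks shared with d2 has equal values".
lemma csdLoop_eq_decide (d1 d2 : PySem.Dict String String) (ks : List String) :
    csdLoop d1 d2 ks =
      decide (∀ k ∈ ks, d2.contains k = true → d1.getD k "" = d2.getD k "") := by
  induction ks with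
  | nil => simp [csdLoop]
  | cons k rest ih =>
    by_cases hc : d2.contains k = true
    · by_cases hv : d1.getD k "" = d2.getD k ""
      · simp [csdLoop, hc, hv, ih]
      · have hf : csdLoop d1 d2 (k :: rest) = false := by
          simp [csdLoop, hc, hv]
        rw [hf]
        symm
        simp only [decide_eq_false_iff_not]
        intro h
        exact hv (h k (List.mem_cons_self) hc)
    · simp [csdLoop, hc, ih]

-- B's merge on strictly-key-sorted lists decides "matching keys carry equal values".
lemma csdMerge_eq_decide (l1 l2 : List (String × String))
    (h1 : l1.Pairwise (fun a b => a.1 < b.1)) (h2 : l2.Pairwise (fun a b => a.1 < b.1)) :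
    csdMerge l1 l2 =
      decide (∀ p ∈ l1, ∀ q ∈ l2, p.1 = q.1 → p.2 = q.2) := by
  induction l1, l2 using csdMerge.induct with
  | case1 l2 => simp [csdMerge]
  | case2 a t => simp [csdMerge]
  | case3 k1 v1 t1 k2 v2 t2 hlt ih =>
    obtain ⟨hh1, ht1⟩ := List.pairwise_cons.1 h1
    obtain ⟨hh2, ht2⟩ := List.pairwise_cons.1 h2
    rw [csdMerge, if_pos hlt, ih ht1 h2]
    congr 1
    apply propext
    constructor
    · intro h p hp q hq hk
      rcases List.mem_cons.1 hp with rfl | hp'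
      · exfalso
        rcases List.mem_cons.1 hq with rfl | hq'
        · exact absurd hk (ne_of_lt hlt)
        · exact absurd hk (ne_of_lt (lt_trans hlt (hh2 q hq')))
      · exact h p hp' q hq hk
    · intro h p hp q hq hk
      exact h p (List.mem_cons_of_mem _ hp) q hq hk
  | case4 k1 v1 t1 k2 v2 t2 hnlt hlt ih =>
    obtain ⟨hh1, ht1⟩ := List.pairwise_cons.1 h1
    obtain ⟨hh2, ht2⟩ := List.pairwise_cons.1 h2
    rw [csdMerge, if_neg hnlt, if_pos hlt, ih h1 ht2]
    congr 1
    apply propext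
    constructor
    · intro h p hp q hq hk
      rcases List.mem_cons.1 hq with rfl | hq'
      · exfalso
        rcases List.mem_cons.1 hp with rfl | hp'
        · exact absurd hk.symm (ne_of_lt hlt)
        · exact absurd hk.symm (ne_of_lt (lt_trans hlt (hh1 p hp')))
      · exact h p hp q hq' hk
    · intro h p hp q hq hk
      exact h p hp q (List.mem_cons_of_mem _ hq) hk
  | case5 k1 v1 t1 k2 v2 t2 hnlt1 hnlt2 hne =>
    have hkeq : k1 = k2 := le_antisymm (not_lt.1 hnlt2) (not_lt.1 hnlt1)
    rw [csdMerge, if_neg hnlt1, if_neg hnlt2, if_pos hne]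
    symm
    simp only [decide_eq_false_iff_not]
    intro h
    exact hne (h (k1, v1) (List.mem_cons_self) (k2, v2) (List.mem_cons_self) hkeq)
  | case6 k1 v1 t1 k2 v2 t2 hnlt1 hnlt2 hveq ih =>
    have hkeq : k1 = k2 := le_antisymm (not_lt.1 hnlt2) (not_lt.1 hnlt1)
    have hveq' : v1 = v2 := not_not.1 hveq
    obtain ⟨hh1, ht1⟩ := List.pairwise_cons.1 h1
    obtain ⟨hh2, ht2⟩ := List.pairwise_cons.1 h2
    rw [csdMerge, if_neg hnlt1, if_neg hnlt2, if_neg hveq, ih ht1 ht2]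
    congr 1
    apply propext
    constructor
    · intro h p hp q hq hk
      rcases List.mem_cons.1 hp with rfl | hp' <;> rcases List.mem_cons.1 hq with rfl | hq'
      · exact hveq'
      · exact absurd hk (ne_of_lt (hkeq ▸ hh2 q hq'))
      · exact absurd hk.symm (ne_of_lt (hkeq ▸ hh1 p hp'))
      · exact h p hp' q hq' hk
    · intro h p hp q hq hk
      exact h p (List.mem_cons_of_mem _ hp) q (List.mem_cons_of_mem _ hq) hk

-- sorted-by-key items of a dict are strictly increasing in the key (keys are unique)
lemma sorted_items_strict (d : PySem.Dict String String) (h : d.keys.Nodup) :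
    (PySem.List.sorted d.items (fun kv => kv.1)).Pairwise (fun a b => a.1 < b.1) := by
  have hle : (PySem.List.sorted d.items (fun kv => kv.1)).Pairwise (fun a b => a.1 ≤ b.1) :=
    PySem.List.sorted_pairwise d.items (fun kv => kv.1)
  have hperm : (PySem.List.sorted d.items (fun kv => kv.1)).Perm d.items :=
    PySem.List.sorted_perm d.items (fun kv => kv.1) false
  have hkeys : d.items.map (fun kv => kv.1) = d.keys := rfl
  have hnd : ((PySem.List.sorted d.items (fun kv => kv.1)).map (fun kv => kv.1)).Nodup :=
    ((hperm.map (fun kv => kv.1)).nodup_iff).2 (hkeys ▸ h)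
  have hne : (PySem.List.sorted d.items (fun kv => kv.1)).Pairwise (fun a b => a.1 ≠ b.1) :=
    List.pairwise_map.1 hnd
  exact (hle.and hne).imp (fun hab => lt_of_le_of_ne hab.1 hab.2)

-- ===== VERDICT (by name: the statement is the Claim_ definition above) =====
theorem check_same_demographic_spec : Claim_equal_check_same_demographic := by
  intro u1 u2 _
  unfold Spec_check_same_demographic check_same_demographic check_same_demographic_alt
  have hnd1 : (PySem.Dict.ofList u1).keys.Nodup := PySem.Dict.nodup_keys_ofList u1
  have hnd2 : (PySem.Dict.ofList u2).keys.Nodup := PySem.Dict.nodup_keys_ofList u2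
  rw [csdLoop_eq_decide,
    csdMerge_eq_decide _ _ (sorted_items_strict _ hnd1) (sorted_items_strict _ hnd2)]
  congr 1
  apply propext
  constructor
  · intro h p hp q hq hk
    rw [PySem.List.mem_sorted] at hp hq
    have hpk : p.1 ∈ (PySem.Dict.ofList u1).keys :=
      PySem.Dict.mem_keys_of_mem_items _ hp
    have hqc : (PySem.Dict.ofList u2).contains p.1 = true :=
      (PySem.Dict.contains_iff_mem_keys _ _).2 (hk ▸ PySem.Dict.mem_keys_of_mem_items _ hq)
    have hv1 : (PySem.Dict.ofList u1).getD p.1 "" = p.2 :=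
      PySem.Dict.getD_of_mem_items _ (Prod.mk.eta ▸ hp) hnd1 ""
    have hv2 : (PySem.Dict.ofList u2).getD p.1 "" = q.2 := by
      rw [hk]
      exact PySem.Dict.getD_of_mem_items _ (Prod.mk.eta ▸ hq) hnd2 ""
    rw [← hv1, ← hv2]
    exact h p.1 hpk hqc
  · intro h k hk hc
    obtain ⟨p, hp, hpk⟩ := List.mem_map.1 hk
    obtain ⟨q, hq, hqk⟩ := List.mem_map.1 ((PySem.Dict.contains_iff_mem_keys _ _).1 hc)
    have hv1 : (PySem.Dict.ofList u1).getD k "" = p.2 :=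
      PySem.Dict.getD_of_mem_items _ (by rw [← hpk]; exact Prod.mk.eta ▸ hp) hnd1 ""
    have hv2 : (PySem.Dict.ofList u2).getD k "" = q.2 :=
      PySem.Dict.getD_of_mem_items _ (by rw [← hqk]; exact Prod.mk.eta ▸ hq) hnd2 ""
    rw [hv1, hv2]
    exact h p ((PySem.List.mem_sorted _ _ _ _).2 hp) q ((PySem.List.mem_sorted _ _ _ _).2 hq)
      (by rw [hpk, hqk])
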